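-- pv_equiv track=rewrite | github.com/ReneGRomCodes/FCC_daily_coding_challenges | python/03-26/05-03-26 Smallest Gap.py | smallest_gap
-- ===== SOURCE A (Python) =====
-- def smallest_gap(s: str) -> str:
--     last_seen: dict[str, int] = {}
--     min_gap: float = float("inf")
--     result: str = ""
--
--     for i, ch in enumerate(s):
--         if ch in last_seen:
--             gap = i - last_seen[ch] - 1
--
--             if gap < min_gap:
--                 min_gap = gap
--                 result = s[last_seen[ch] + 1:i]
--
--         last_seen[ch] = i
--
--     return result
-- ===== SOURCE B (Python) =====
-- def smallest_gap(s: str) -> str: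
--     # Scan by increasing distance d: the first d for which some position i has
--     # s[i] == s[i + d] (taking the leftmost such i) gives the closest repeated
--     # pair, and the substring between them is s[i + 1 : i + d].  No dictionary,
--     # no running minimum: the search order itself realises the minimisation.
--     for d in range(1, len(s)):
--         for i, (a, b) in enumerate(zip(s, s[d:])):
--             if a == b:
--                 return s[i + 1:i + d]
--     return ""
-- ===== Notes on version B (the rewrite author's own statement) =====
-- stated objective: alternative
-- what changed: B drops A's last-occurrence dictionary and running minimum entirely: it searches distances d = 1, 2, ... in increasing order and returns at the first position i with s[i] == s[i+d], so the search order itself realises the minimisation and exactly one slice is taken.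
import Mathlib
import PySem

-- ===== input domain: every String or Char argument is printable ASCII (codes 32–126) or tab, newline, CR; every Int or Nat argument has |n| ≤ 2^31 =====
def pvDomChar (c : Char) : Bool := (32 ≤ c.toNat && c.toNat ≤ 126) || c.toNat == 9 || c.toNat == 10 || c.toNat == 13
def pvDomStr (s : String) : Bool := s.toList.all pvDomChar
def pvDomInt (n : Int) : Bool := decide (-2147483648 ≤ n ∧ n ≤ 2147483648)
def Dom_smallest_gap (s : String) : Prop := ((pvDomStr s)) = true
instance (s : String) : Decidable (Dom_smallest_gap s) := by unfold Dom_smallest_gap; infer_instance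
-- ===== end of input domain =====

-- B replaces A's dictionary-of-last-occurrences scan with a search by increasing
-- distance d, returning at the first (d, i) with s[i] == s[i + d]; same return value
-- (objective: alternative).

-- ===== PORT A =====
-- 'gap < min_gap' where min_gap = none plays float("inf") (exact: min_gap is only compared with '<')
def ltInf (gap : Int) : Option Int -> Bool
  | none => true
  | some m => decide (gap < m)

-- loop body of A's for-loop
def aStep (cs : List Char) (st : PySem.Dict Char Int × Option Int × List Char) (p : Int × Char) :
    PySem.Dict Char Int × Option Int × List Char :=
  let upd :=
    match st.1.get? p.2 with
    | some j =>
      let gap := p.1 - j - 1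
      if ltInf gap st.2.1 then
        (some gap, PySem.List.slice cs (some (j + 1)) (some p.1))
      else (st.2.1, st.2.2)
    | none => (st.2.1, st.2.2)
  (st.1.insert p.2 p.1, upd.1, upd.2)

def smallest_gap (s : String) : String :=
  let cs := s.toList
  let st := (PySem.List.enumerate cs 0).foldl (aStep cs) (PySem.Dict.empty, none, [])
  String.ofList st.2.2

-- ===== PORT B =====
-- inner loop: first i with s[i] == s[i+d] (enumerate(zip(s, s[d:])) with early return)
def findPair (cs : List Char) (d : Int) : Option Nat :=
  (cs.zip (PySem.List.slice cs (some d) none)).findIdx? (fun p => p.1 == p.2)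

-- outer loop over the distances d = 1, 2, …, len(s)-1, with early return
def searchD (cs : List Char) : List Int → Option (Int × Nat)
  | [] => none
  | d :: rest =>
    match findPair cs d with
    | some i => some (d, i)
    | none => searchD cs rest

def smallest_gap_alt (s : String) : String :=
  let cs := s.toList
  match searchD cs (PySem.List.pyRange 1 (PySem.Str.len s) 1) with
  | none => ""
  | some (d, i) =>
    String.ofList (PySem.List.slice cs (some ((i : Int) + 1)) (some ((i : Int) + d)))

-- ===== PRECONDITION & SPEC =====
def Spec_smallest_gap (s : String) (out : String) : Prop := out = smallest_gap_alt s
instance (s : String) (out : String) : Decidable (Spec_smallest_gap s out) := by unfold Spec_smallest_gap; infer_instance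

-- ===== CLAIM (what is proved, stated in full; the proofs are below) =====
def Claim_equal_smallest_gap : Prop := ∀ (s : String), Dom_smallest_gap s → Spec_smallest_gap s (smallest_gap s)

-- ===== LEMMAS AND PROOFS =====

-- a repeated pair of equal characters at distance d, starting at i
def Pair (cs : List Char) (d i : Nat) : Prop :=
  1 ≤ d ∧ i + d < cs.length ∧ cs[i]? = cs[i + d]?

-- index of the last occurrence of ch among cs[0..m-1]
def lastIdx? (cs : List Char) (ch : Char) : Nat → Option Nat
  | 0 => none
  | m + 1 => if cs[m]? = some ch then some m else lastIdx? cs ch m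

theorem lastIdx?_some {cs : List Char} {ch : Char} {m j : Nat}
    (h : lastIdx? cs ch m = some j) :
    j < m ∧ cs[j]? = some ch ∧ ∀ k, j < k → k < m → cs[k]? ≠ some ch := by
  induction m with
  | zero => simp [lastIdx?] at h
  | succ m ih =>
    by_cases hc : cs[m]? = some ch
    · simp only [lastIdx?, if_pos hc, Option.some.injEq] at h
      subst h
      exact ⟨by omega, hc, fun k hk1 hk2 => by omega⟩
    · simp only [lastIdx?, if_neg hc] at h
      obtain ⟨h1, h2, h3⟩ := ih h
      refine ⟨by omega, h2, fun k hk1 hk2 => ?_⟩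
      rcases Nat.lt_or_ge k m with hk | hk
      · exact h3 k hk1 hk
      · have : k = m := by omega
        subst this; exact hc

theorem lastIdx?_none {cs : List Char} {ch : Char} {m : Nat}
    (h : lastIdx? cs ch m = none) : ∀ k, k < m → cs[k]? ≠ some ch := by
  induction m with
  | zero => intro k hk; omega
  | succ m ih =>
    by_cases hc : cs[m]? = some ch
    · simp [lastIdx?, hc] at h
    · simp only [lastIdx?, if_neg hc] at h
      intro k hk
      rcases Nat.lt_or_ge k m with hk' | hk'
      · exact ih h k hk'
      · have : k = m := by omega
        subst this; exact hc

-- the dictionary holds the last occurrence of each character in the processed prefix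
def DInv (cs : List Char) (m : Nat) (dict : PySem.Dict Char Int) : Prop :=
  ∀ ch, dict.get? ch = (lastIdx? cs ch m).map (fun j => (j : Int))

-- A's (min_gap, result) is the lexicographically least pair of the processed prefix
def MInv (cs : List Char) (m : Nat) (mg : Option Int) (res : List Char) : Prop :=
  (mg = none ∧ res = [] ∧ ∀ d i, i + d < m → ¬ Pair cs d i) ∨
  (∃ d i, Pair cs d i ∧ i + d < m ∧ mg = some ((d : Int) - 1) ∧
    res = PySem.List.slice cs (some ((i : Int) + 1)) (some ((i : Int) + (d : Int))) ∧
    ∀ d' i', Pair cs d' i' → i' + d' < m → (d < d' ∨ (d = d' ∧ i ≤ i')))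

theorem MInv_succ {cs : List Char} {m : Nat} {mg : Option Int} {res : List Char}
    (h : MInv cs m mg res) (hend : ∀ d i, i + d = m → ¬ Pair cs d i) :
    MInv cs (m + 1) mg res := by
  rcases h with ⟨h1, h2, h3⟩ | ⟨d, i, hp, hb, h1, h2, h3⟩
  · refine Or.inl ⟨h1, h2, fun d i hdi hp => ?_⟩
    rcases Nat.lt_or_ge (i + d) m with hc | hc
    · exact h3 d i hc hp
    · exact hend d i (by omega) hp
  · refine Or.inr ⟨d, i, hp, by omega, h1, h2, fun d' i' hp' hb' => ?_⟩
    rcases Nat.lt_or_ge (i' + d') m with hc | hc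
    · exact h3 d' i' hp' hc
    · exact absurd hp' (hend d' i' (by omega))

-- every pair ending exactly at m starts at or before the last occurrence j of cs[m]
theorem pair_end_at {cs : List Char} {m j : Nat} {ch : Char}
    (hch : cs[m]? = some ch) (_hjch : cs[j]? = some ch) (hjm : j < m)
    (hjmax : ∀ k, j < k → k < m → cs[k]? ≠ some ch) :
    ∀ d i, Pair cs d i → i + d = m → (m - j ≤ d ∧ (d = m - j → i = j)) := by
  intro d i ⟨hd1, _, heq⟩ hdm
  have hich : cs[i]? = some ch := by rw [heq, hdm, hch]
  have him : i < m := by omega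
  have hij : i ≤ j := by
    by_contra hc
    exact hjmax i (by omega) him hich
  exact ⟨by omega, fun hdj => by omega⟩

-- A's loop establishes and maintains DInv and MInv up to the end of the string
theorem a_loop_inv (cs : List Char) (rest : List Char) :
    ∀ (m : Nat) (dict : PySem.Dict Char Int) (mg : Option Int) (res : List Char),
    (∀ k, rest[k]? = cs[m + k]?) → m + rest.length = cs.length →
    DInv cs m dict → MInv cs m mg res →
    MInv cs cs.length
      ((PySem.List.enumerate rest (m : Int)).foldl (aStep cs) (dict, mg, res)).2.1
      ((PySem.List.enumerate rest (m : Int)).foldl (aStep cs) (dict, mg, res)).2.2 := by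
  induction rest with
  | nil =>
    intro m dict mg res _ hlen _ hM
    have : m = cs.length := by simpa using hlen
    subst this
    simpa [PySem.List.enumerate_nil] using hM
  | cons ch rest ih =>
    intro m dict mg res hrest hlen hD hM
    have hch : cs[m]? = some ch := by simpa using (hrest 0).symm
    have hm : m < cs.length := by simp at hlen; omega
    have hrest' : ∀ k, rest[k]? = cs[(m + 1) + k]? := by
      intro k
      have := hrest (k + 1)
      simpa [Nat.add_assoc, Nat.add_comm 1 k] using this
    have hlen' : (m + 1) + rest.length = cs.length := by simp at hlen ⊢; omega
    have hcast : ((m : Int) + 1) = ((m + 1 : Nat) : Int) := by push_cast; ring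
    rw [PySem.List.enumerate_cons, List.foldl_cons, hcast]
    -- dictionary update preserves DInv
    have hD' : DInv cs (m + 1) (dict.insert ch (m : Int)) := by
      intro ch'
      by_cases hc : ch' = ch
      · subst hc
        rw [PySem.Dict.get?_insert_self]
        simp [lastIdx?, hch]
      · rw [PySem.Dict.get?_insert_of_ne dict _ hc]
        have : cs[m]? ≠ some ch' := by rw [hch]; simp; exact fun h => hc h.symm
        simp only [lastIdx?, if_neg this]
        exact hD ch'
    cases hlast : lastIdx? cs ch m with
    | none =>
      have hget : dict.get? ch = none := by rw [hD ch, hlast]; rfl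
      have hstep : aStep cs (dict, mg, res) ((m : Int), ch) = (dict.insert ch (m : Int), mg, res) := by
        simp [aStep, hget]
      rw [hstep]
      have hend : ∀ d i, i + d = m → ¬ Pair cs d i := by
        intro d i hdi ⟨hd1, _, heq⟩
        have hich : cs[i]? = some ch := by rw [heq, hdi, hch]
        exact lastIdx?_none hlast i (by omega) hich
      exact ih (m + 1) _ mg res hrest' hlen' hD' (MInv_succ hM hend)
    | some j =>
      have hget : dict.get? ch = some (j : Int) := by rw [hD ch, hlast]; rfl
      obtain ⟨hjm, hjch, hjmax⟩ := lastIdx?_some hlast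
      have hendat := pair_end_at hch hjch hjm hjmax
      have hpairNew : Pair cs (m - j) j :=
        ⟨by omega, by omega, by rw [show j + (m - j) = m by omega, hjch, hch]⟩
      have hgap : (m : Int) - (j : Int) - 1 = ((m - j : Nat) : Int) - 1 := by omega
      have hsl : PySem.List.slice cs (some ((j : Int) + 1)) (some (m : Int)) =
          PySem.List.slice cs (some ((j : Int) + 1)) (some ((j : Int) + ((m - j : Nat) : Int))) := by
        have he : (m : Int) = (j : Int) + ((m - j : Nat) : Int) := by omega
        rw [he]
      -- the updated-state invariant (used when A takes the new pair)
      have hupd : ∀ (hmin : ∀ d' i', Pair cs d' i' → i' + d' < m → (m - j) < d'),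
          MInv cs (m + 1) (some ((m : Int) - (j : Int) - 1))
            (PySem.List.slice cs (some ((j : Int) + 1)) (some (m : Int))) := by
        intro hmin
        refine Or.inr ⟨m - j, j, hpairNew, by omega, by rw [hgap], by rw [hsl], ?_⟩
        intro d' i' hp' hb'
        rcases Nat.lt_or_ge (i' + d') m with hc | hc
        · exact Or.inl (hmin d' i' hp' hc)
        · have he : i' + d' = m := by omega
          obtain ⟨hle, hie⟩ := hendat d' i' hp' he
          rcases Nat.lt_or_ge (m - j) d' with h1 | h1
          · exact Or.inl h1
          · have : d' = m - j := by omega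
            exact Or.inr ⟨this.symm, by omega⟩
      rcases hM with ⟨hmg, hres, hnop⟩ | ⟨d0, i0, hp0, hb0, hmg, hres, hmin0⟩
      · -- no pair yet: min_gap is inf, A takes the new pair
        have hstep : aStep cs (dict, mg, res) ((m : Int), ch) =
            (dict.insert ch (m : Int), some ((m : Int) - (j : Int) - 1),
              PySem.List.slice cs (some ((j : Int) + 1)) (some (m : Int))) := by
          simp [aStep, hget, hmg, ltInf]
        rw [hstep]
        exact ih (m + 1) _ _ _ hrest' hlen' hD'
          (hupd (fun d' i' hp' hc => absurd hp' (hnop d' i' hc)))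
      · -- existing minimum (d0, i0); compare the new gap with it
        by_cases hcmp : m - j < d0
        · have hlt : ltInf ((m : Int) - (j : Int) - 1) mg = true := by
            rw [hmg]; simp [ltInf]; omega
          have hstep : aStep cs (dict, mg, res) ((m : Int), ch) =
              (dict.insert ch (m : Int), some ((m : Int) - (j : Int) - 1),
                PySem.List.slice cs (some ((j : Int) + 1)) (some (m : Int))) := by
            simp [aStep, hget, hlt]
          rw [hstep]
          refine ih (m + 1) _ _ _ hrest' hlen' hD' (hupd ?_)
          intro d' i' hp' hc
          rcases hmin0 d' i' hp' hc with h | ⟨h, _⟩ <;> omega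
        · have hlt : ltInf ((m : Int) - (j : Int) - 1) mg = false := by
            rw [hmg]; simp [ltInf]; omega
          have hstep : aStep cs (dict, mg, res) ((m : Int), ch) =
              (dict.insert ch (m : Int), mg, res) := by
            simp [aStep, hget, hlt]
          rw [hstep]
          refine ih (m + 1) _ _ _ hrest' hlen' hD' ?_
          refine Or.inr ⟨d0, i0, hp0, by omega, hmg, hres, ?_⟩
          intro d' i' hp' hb'
          rcases Nat.lt_or_ge (i' + d') m with hc | hc
          · exact hmin0 d' i' hp' hc
          · have he : i' + d' = m := by omega
            obtain ⟨hle, hie⟩ := hendat d' i' hp' he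
            rcases Nat.lt_or_ge d0 d' with h1 | h1
            · exact Or.inl h1
            · have hd'0 : d' = d0 := by omega
              have : d' = m - j := by omega
              have hij : i' = j := hie this
              refine Or.inr ⟨hd'0.symm, ?_⟩
              omega

-- findPair finds nothing when there is no pair at distance d
theorem findPair_eq_none {cs : List Char} {d : Nat} (hd : 1 ≤ d)
    (h : ∀ i, ¬ Pair cs d i) : findPair cs (d : Int) = none := by
  unfold findPair
  rw [PySem.List.slice_from_natCast, List.findIdx?_eq_none_iff]
  intro x hx
  obtain ⟨i, hi, hxe⟩ := List.mem_iff_getElem.mp hx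
  have hsome : (cs.zip (cs.drop d))[i]? = some x := by
    rw [List.getElem?_eq_getElem hi, hxe]
  obtain ⟨h1, h2⟩ := (List.getElem?_zip_eq_some).mp (by rw [hsome])
  rw [List.getElem?_drop] at h2
  obtain ⟨hbound, -⟩ := List.getElem?_eq_some_iff.mp h2
  simp only [beq_eq_false_iff_ne, ne_eq]
  intro hxeq
  exact h i ⟨hd, by omega, by rw [h1, show i + d = d + i by omega, h2, hxeq]⟩

-- findPair returns the leftmost pair at distance d
theorem findPair_eq_some {cs : List Char} {d i : Nat}
    (hp : Pair cs d i) (hmin : ∀ i', i' < i → ¬ Pair cs d i') :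
    findPair cs (d : Int) = some i := by
  obtain ⟨hd1, hbd, heq⟩ := hp
  unfold findPair
  rw [PySem.List.slice_from_natCast, List.findIdx?_eq_some_iff_getElem]
  have hlenz : (cs.zip (cs.drop d)).length = cs.length - d := by
    rw [List.length_zip, List.length_drop]; omega
  have hi : i < (cs.zip (cs.drop d)).length := by omega
  have hget : ∀ k, ∀ hk : k < (cs.zip (cs.drop d)).length,
      (cs.zip (cs.drop d))[k] = (cs[k]'(by omega), cs[k + d]'(by omega)) := by
    intro k hk
    have hz : (cs.zip (cs.drop d))[k]? = some (cs[k]'(by omega), cs[k + d]'(by omega)) := by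
      rw [List.getElem?_zip_eq_some]
      constructor
      · exact List.getElem?_eq_getElem (by omega)
      · rw [List.getElem?_drop]
        have hdk : d + k = k + d := by omega
        rw [hdk]
        exact List.getElem?_eq_getElem (by omega)
    rw [List.getElem?_eq_getElem hk] at hz
    exact Option.some_inj.mp hz
  refine ⟨hi, ?_, ?_⟩
  · rw [hget i hi]
    simp only [beq_iff_eq]
    have h1 : cs[i]? = some (cs[i]'(by omega)) := List.getElem?_eq_getElem (by omega)
    have h2 : cs[i + d]? = some (cs[i + d]'(by omega)) := List.getElem?_eq_getElem (by omega)
    rw [h1, h2] at heq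
    exact Option.some_inj.mp heq
  · intro j hj
    rw [hget j (by omega)]
    intro hxeq
    refine hmin j hj ⟨hd1, by omega, ?_⟩
    rw [List.getElem?_eq_getElem (show j < cs.length by omega),
      List.getElem?_eq_getElem (show j + d < cs.length by omega)]
    exact congrArg some (beq_iff_eq.mp hxeq)

-- the outer search returns none when the string has no repeated pair at all
theorem searchD_none (cs : List Char) (h : ∀ d i, ¬ Pair cs d i) :
    ∀ (fuel : Nat) (a : Int), 1 ≤ a → ((cs.length : Int) - a).toNat ≤ fuel →
    searchD cs (PySem.List.pyRange a (cs.length : Int) 1) = none := by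
  intro fuel
  induction fuel with
  | zero =>
    intro a ha hf
    rw [PySem.List.pyRange_one_eq_nil (by omega)]
    rfl
  | succ fuel ih =>
    intro a ha hf
    rcases Int.lt_or_le a (cs.length : Int) with hlt | hge
    · rw [PySem.List.pyRange_one_cons hlt]
      have hnat : a = ((a.toNat : Nat) : Int) := by omega
      have hfp : findPair cs a = none := by
        rw [hnat]
        exact findPair_eq_none (by omega) (fun i => h a.toNat i)
      simp only [searchD, hfp]
      exact ih (a + 1) (by omega) (by omega)
    · rw [PySem.List.pyRange_one_eq_nil (by omega)]
      rfl

-- the outer search returns the lexicographically least pair (d, i)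
theorem searchD_min (cs : List Char) (d i : Nat) (hp : Pair cs d i)
    (hmin : ∀ d' i', Pair cs d' i' → (d < d' ∨ (d = d' ∧ i ≤ i'))) :
    ∀ (fuel : Nat) (a : Int), 1 ≤ a → a ≤ (d : Int) → ((d : Int) - a).toNat ≤ fuel →
    searchD cs (PySem.List.pyRange a (cs.length : Int) 1) = some ((d : Int), i) := by
  have hdlen : d < cs.length := by have := hp.2.1; omega
  intro fuel
  induction fuel with
  | zero =>
    intro a ha had hf
    have hae : a = (d : Int) := by omega
    subst hae
    rw [PySem.List.pyRange_one_cons (by exact_mod_cast hdlen)]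
    have hfp : findPair cs (d : Int) = some i := by
      refine findPair_eq_some hp (fun i' hi' hp' => ?_)
      rcases hmin d i' hp' with h | ⟨_, h⟩ <;> omega
    simp only [searchD, hfp]
  | succ fuel ih =>
    intro a ha had hf
    rcases Int.lt_or_le a (d : Int) with hlt | hge
    · rw [PySem.List.pyRange_one_cons (by omega)]
      have hnat : a = ((a.toNat : Nat) : Int) := by omega
      have hfp : findPair cs a = none := by
        rw [hnat]
        refine findPair_eq_none (by omega) (fun i' hp' => ?_)
        rcases hmin a.toNat i' hp' with h | ⟨h, _⟩ <;> omega
      simp only [searchD, hfp]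
      exact ih (a + 1) (by omega) (by omega) (by omega)
    · -- a = d
      have hae : a = (d : Int) := by omega
      subst hae
      rw [PySem.List.pyRange_one_cons (by exact_mod_cast hdlen)]
      have hfp : findPair cs (d : Int) = some i := by
        refine findPair_eq_some hp (fun i' hi' hp' => ?_)
        rcases hmin d i' hp' with h | ⟨_, h⟩ <;> omega
      simp only [searchD, hfp]

-- ===== VERDICT (by name: the statement is the Claim_ definition above) =====
theorem smallest_gap_spec : Claim_equal_smallest_gap := by
  intro s _
  unfold Spec_smallest_gap smallest_gap smallest_gap_alt
  have hD0 : DInv s.toList 0 PySem.Dict.empty := by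
    intro ch
    simp [lastIdx?, PySem.Dict.get?_empty]
  have hM0 : MInv s.toList 0 none [] :=
    Or.inl ⟨rfl, rfl, fun d i hdi _ => by omega⟩
  have hinv := a_loop_inv s.toList s.toList 0 PySem.Dict.empty none []
    (fun k => by simp) (by simp) hD0 hM0
  rw [Nat.cast_zero] at hinv
  have hlen : PySem.Str.len s = (s.toList.length : Int) := by
    simp [PySem.Str.len_eq]
  rcases hinv with ⟨hmg, hres, hnop⟩ | ⟨d, i, hp, _, hmg, hres, hminp⟩
  · have hno : ∀ d i, ¬ Pair s.toList d i := fun d i hp => hnop d i hp.2.1 hp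
    have hsd := searchD_none s.toList hno ((s.toList.length : Int) - 1).toNat 1 (by omega) (by omega)
    simp only [hlen, hsd]
    rw [hres]
  · have hmin : ∀ d' i', Pair s.toList d' i' → (d < d' ∨ (d = d' ∧ i ≤ i')) :=
      fun d' i' hp' => hminp d' i' hp' hp'.2.1
    have hsd := searchD_min s.toList d i hp hmin ((d : Int) - 1).toNat 1 (by omega)
      (by exact_mod_cast hp.1) (by omega)
    simp only [hlen, hsd]
    rw [hres]
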